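-- pv_equiv track=rewrite | github.com/MarkoYwirur/moh-assistant | internal/style_renderer.py | _limit_sentences
-- ===== SOURCE A (Python) =====
-- def _limit_sentences(text: str, max_sentences: int) -> str:
--     if not text:
--         return ""
--     normalized = text.replace("?", "։").replace("!", "։")
--     parts = [p.strip() for p in normalized.split("։") if p.strip()]
--     parts = parts[:max_sentences]
--     if not parts:
--         return ""
--     return "։ ".join(parts) + "։"
-- ===== SOURCE B (Python) =====
-- def _limit_sentences(text: str, max_sentences: int) -> str:
--     parts = []
--     buf = []
--     for c in text:
--         if c in "?!։":
--             s = "".join(buf).strip()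
--             if s:
--                 parts.append(s)
--             buf = []
--         else:
--             buf.append(c)
--     s = "".join(buf).strip()
--     if s:
--         parts.append(s)
--     parts = parts[:max_sentences]
--     if not parts:
--         return ""
--     return "։ ".join(parts) + "։"
-- ===== Notes on version B (the rewrite author's own statement) =====
-- stated objective: alternative
-- what changed: Replaces the replace()+split()+per-piece strip/filter pipeline with a single left-to-right character scan that buffers the current sentence and flushes it (stripped, dropped if empty) at each terminator; the empty-text guard becomes unnecessary.
import Mathlib
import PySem

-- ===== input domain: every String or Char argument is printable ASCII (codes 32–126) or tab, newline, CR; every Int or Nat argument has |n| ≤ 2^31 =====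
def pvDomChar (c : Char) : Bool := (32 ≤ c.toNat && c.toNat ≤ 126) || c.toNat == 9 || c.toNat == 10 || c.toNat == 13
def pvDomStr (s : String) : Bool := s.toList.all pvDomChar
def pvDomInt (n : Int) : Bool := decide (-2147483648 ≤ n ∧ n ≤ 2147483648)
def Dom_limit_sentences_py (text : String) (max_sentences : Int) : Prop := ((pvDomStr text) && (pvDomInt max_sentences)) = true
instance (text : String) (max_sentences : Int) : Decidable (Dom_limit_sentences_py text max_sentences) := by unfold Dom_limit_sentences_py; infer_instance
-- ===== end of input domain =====

-- B replaces A's replace()+split()+strip() tokenization by a single character scan that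
-- flushes sentence buffers at each terminator (objective: alternative decomposition, same cost).


-- ===== PORT A =====
def limit_sentences_py (text : String) (max_sentences : Int) : String :=
  if text.toList = [] then "" else
  let normalized := PySem.Chars.replace (PySem.Chars.replace text.toList ['?'] ['։']) ['!'] ['։']
  let parts := ((PySem.Chars.splitOn normalized ['։']).filter
      (fun p => !(PySem.Chars.strip p).isEmpty)).map PySem.Chars.strip
  let parts := PySem.List.slice parts none (some max_sentences)
  if parts = [] then "" else String.ofList (PySem.Chars.join ['։', ' '] parts ++ ['։'])

-- ===== PORT B =====
-- single left-to-right scan: buffer the current sentence, flush (strip, drop if empty) at '?','!','։'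
def pvScan : List Char → List Char → List (List Char) → List (List Char)
  | [], buf, acc =>
      let s := PySem.Chars.strip buf
      if s = [] then acc else acc ++ [s]
  | c :: rest, buf, acc =>
      if c = '?' ∨ c = '!' ∨ c = '։' then
        let s := PySem.Chars.strip buf
        pvScan rest [] (if s = [] then acc else acc ++ [s])
      else pvScan rest (buf ++ [c]) acc

def limit_sentences_py_alt (text : String) (max_sentences : Int) : String :=
  let parts := pvScan text.toList [] []
  let parts := PySem.List.slice parts none (some max_sentences)
  if parts = [] then "" else String.ofList (PySem.Chars.join ['։', ' '] parts ++ ['։'])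

-- ===== PRECONDITION & SPEC =====
def Spec_limit_sentences_py (text : String) (max_sentences : Int) (out : String) : Prop := out = limit_sentences_py_alt text max_sentences
instance (text : String) (max_sentences : Int) (out : String) : Decidable (Spec_limit_sentences_py text max_sentences out) := by unfold Spec_limit_sentences_py; infer_instance

-- ===== CLAIM (what is proved, stated in full; the proofs are below) =====
def Claim_equal_limit_sentences_py : Prop := ∀ (text : String) (max_sentences : Int), Dom_limit_sentences_py text max_sentences → Spec_limit_sentences_py text max_sentences (limit_sentences_py text max_sentences)

-- ===== LEMMAS AND PROOFS =====

-- prepend x to the first piece (helper describing splitOn's shape)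
def pvConsHead (x : List Char) : List (List Char) → List (List Char)
  | [] => [x]
  | h :: t => (x ++ h) :: t

-- structural split on '։'
def pvSplit : List Char → List (List Char)
  | [] => [[]]
  | c :: t => if c = '։' then [] :: pvSplit t else pvConsHead [c] (pvSplit t)

-- A's per-piece post-processing: keep the pieces whose strip is non-empty, stripped
def pvKeep (l : List (List Char)) : List (List Char) :=
  (l.filter (fun p => !(PySem.Chars.strip p).isEmpty)).map PySem.Chars.strip

-- Python's single-character replacement is a map
def pvNorm (c : Char) : Char := if c = '?' ∨ c = '!' then '։' else c

theorem pvSplit_ne_nil (l : List Char) : pvSplit l ≠ [] := by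
  induction l with
  | nil => simp [pvSplit]
  | cons c t ih =>
    simp only [pvSplit]
    split
    · simp
    · cases h : pvSplit t <;> simp [pvConsHead]

theorem pvConsHead_nil_of_ne (L : List (List Char)) (h : L ≠ []) : pvConsHead [] L = L := by
  cases L with
  | nil => exact absurd rfl h
  | cons a t => simp [pvConsHead]

theorem pvConsHead_consHead (x y : List Char) (L : List (List Char)) :
    pvConsHead x (pvConsHead y L) = pvConsHead (x ++ y) L := by
  cases L <;> simp [pvConsHead]

theorem splitOn_go_eq (fuel : Nat) (l cur : List Char) (accL : List (List Char))
    (h : l.length ≤ fuel) :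
    PySem.Chars.splitOn.go ['։'] fuel l cur accL = accL.reverse ++ pvConsHead cur.reverse (pvSplit l) := by
  induction l generalizing fuel cur accL with
  | nil => cases fuel <;> simp [PySem.Chars.splitOn.go, pvSplit, pvConsHead]
  | cons c t ih =>
    cases fuel with
    | zero => simp at h
    | succ n =>
      simp only [PySem.Chars.splitOn.go]
      by_cases hc : c = '։'
      · subst hc
        obtain ⟨h0, t0, he⟩ := List.exists_cons_of_ne_nil (pvSplit_ne_nil t)
        simp [List.isPrefixOf, ih n [] (cur.reverse :: accL) (by simpa using h), pvSplit, he,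
          pvConsHead]
      · simp [List.isPrefixOf, hc, Ne.symm, ih n (c :: cur) accL (by simpa using h), pvSplit,
          pvConsHead_consHead]

theorem splitOn_eq (s : List Char) : PySem.Chars.splitOn s ['։'] = pvSplit s := by
  simp [PySem.Chars.splitOn, splitOn_go_eq (s.length + 1) s [] [] (by omega),
    pvConsHead_nil_of_ne _ (pvSplit_ne_nil s)]

theorem replace_single (a b : Char) (s : List Char) :
    PySem.Chars.replace s [a] [b] = s.map (fun c => if c = a then b else c) := by
  have go : ∀ (l : List Char) (fuel : Nat) (acc : List Char), l.length ≤ fuel →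
      PySem.Chars.replace.go [a] [b] fuel l acc = acc.reverse ++ l.map (fun c => if c = a then b else c) := by
    intro l
    induction l with
    | nil => intro fuel acc h; cases fuel <;> simp [PySem.Chars.replace.go]
    | cons c t ih =>
      intro fuel acc h
      cases fuel with
      | zero => simp at h
      | succ n =>
        simp only [PySem.Chars.replace.go]
        by_cases hc : c = a
        · subst hc; simp [List.isPrefixOf, ih n (b :: acc) (by simpa using h)]
        · simp [List.isPrefixOf, hc, ih n (c :: acc) (by simpa using h), Ne.symm]
  simp [PySem.Chars.replace, go s s.length [] le_rfl]

theorem normalized_eq (s : List Char) :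
    PySem.Chars.replace (PySem.Chars.replace s ['?'] ['։']) ['!'] ['։'] = s.map pvNorm := by
  simp only [replace_single, List.map_map]
  refine List.map_congr_left fun c _ => ?_
  simp only [Function.comp, pvNorm]
  by_cases h1 : c = '?' <;> by_cases h2 : c = '!' <;> simp [h1, h2]

theorem pvKeep_cons (p : List Char) (L : List (List Char)) :
    pvKeep (p :: L) =
      (if PySem.Chars.strip p = [] then [] else [PySem.Chars.strip p]) ++ pvKeep L := by
  simp only [pvKeep, List.filter_cons]
  split_ifs with h <;> simp_all

theorem pvScan_eq (cs : List Char) : ∀ (buf : List Char) (acc : List (List Char)),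
    pvScan cs buf acc = acc ++ pvKeep (pvConsHead buf (pvSplit (cs.map pvNorm))) := by
  induction cs with
  | nil =>
    intro buf acc
    simp only [pvScan, List.map_nil, pvSplit, pvConsHead, List.append_nil, pvKeep_cons]
    split_ifs <;> simp [pvKeep]
  | cons c rest ih =>
    intro buf acc
    by_cases hc : c = '?' ∨ c = '!' ∨ c = '։'
    · have hn : pvNorm c = '։' := by
        rcases hc with h | h | h <;> simp [pvNorm, h]
      obtain ⟨h0, t0, he⟩ := List.exists_cons_of_ne_nil (pvSplit_ne_nil (rest.map pvNorm))
      simp only [pvScan, if_pos hc, ih, List.map_cons, hn, pvSplit, he, pvConsHead,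
        List.nil_append]
      split_ifs <;> simp_all [pvKeep_cons]
    · have hn : pvNorm c = c := by
        simp only [pvNorm]; rw [if_neg]; tauto
      have hc3 : ¬ c = '։' := by tauto
      simp only [pvScan, if_neg hc, ih, List.map_cons, hn, pvSplit, if_neg hc3,
        pvConsHead_consHead]

theorem scan_eq_pipeline (cs : List Char) :
    pvScan cs [] [] = pvKeep (pvSplit (cs.map pvNorm)) := by
  rw [pvScan_eq cs [] [], pvConsHead_nil_of_ne _ (pvSplit_ne_nil _), List.nil_append]

-- ===== VERDICT (by name: the statement is the Claim_ definition above) =====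
theorem limit_sentences_py_spec : Claim_equal_limit_sentences_py := by
  intro text m _
  show limit_sentences_py text m = limit_sentences_py_alt text m
  unfold limit_sentences_py limit_sentences_py_alt
  by_cases h : text.toList = []
  · simp [h, pvScan, PySem.Chars.strip, PySem.Chars.lstrip, PySem.Chars.rstrip,
      PySem.List.slice, PySem.List.clampIdx]
  · rw [if_neg h]
    have : ((PySem.Chars.splitOn
        (PySem.Chars.replace (PySem.Chars.replace text.toList ['?'] ['։']) ['!'] ['։'])
        ['։']).filter (fun p => !(PySem.Chars.strip p).isEmpty)).map PySem.Chars.strip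
        = pvScan text.toList [] [] := by
      rw [scan_eq_pipeline, normalized_eq, splitOn_eq]; rfl
    simp only [this]
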